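-- pv_equiv track=rewrite | github.com/ThreeFistfulsofFigs/Python_Beginners_Projects | Website_status/main.py | analyze_status_code
-- ===== SOURCE A (Python) =====
-- from typing import Dict, List, Optional, Tuple, Any  # For type annotations
--
-- SUCCESS_INDICATOR = "✓"
--
-- ERROR_INDICATOR = "✗"
--
-- WARNING_INDICATOR = "⚠"
--
-- STATUS_CODE_CATEGORIES = {
--     'informational': range(100, 200),
--     'success': range(200, 300),
--     'redirection': range(300, 400),
--     'client_error': range(400, 500),
--     'server_error': range(500, 600)
-- }
--
-- def analyze_status_code(status_code: int) -> Tuple[str, str, str]: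
--     """
--     Analyzes HTTP status code and provides category, description, and indicator.
--
--     Args:
--         status_code (int): The HTTP response status code.
--
--     Returns:
--         Tuple[str, str, str]: Category, description, and visual indicator.
--     """
--     # STATUS CODE CATEGORIZATION
--     for category, code_range in STATUS_CODE_CATEGORIES.items():
--         if status_code in code_range:
--             # CATEGORY-SPECIFIC ANALYSIS
--             if category == 'success':
--                 return category, "Request successful", SUCCESS_INDICATOR
--             elif category == 'redirection':
--                 return category, "Redirection required", WARNING_INDICATOR
--             elif category == 'client_error':
--                 return category, "Client error occurred", ERROR_INDICATOR
--             elif category == 'server_error':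
--                 return category, "Server error occurred", ERROR_INDICATOR
--             elif category == 'informational':
--                 return category, "Informational response", WARNING_INDICATOR
--
--     # UNKNOWN STATUS CODE
--     return "unknown", "Unknown status code", ERROR_INDICATOR
-- ===== SOURCE B (Python) =====
-- SUCCESS_INDICATOR = "✓"
-- ERROR_INDICATOR = "✗"
-- WARNING_INDICATOR = "⚠"
--
-- _BUCKETS = {
--     1: ('informational', "Informational response", WARNING_INDICATOR),
--     2: ('success', "Request successful", SUCCESS_INDICATOR),
--     3: ('redirection', "Redirection required", WARNING_INDICATOR),
--     4: ('client_error', "Client error occurred", ERROR_INDICATOR),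
--     5: ('server_error', "Server error occurred", ERROR_INDICATOR),
-- }
--
-- def analyze_status_code(status_code):
--     return _BUCKETS.get(status_code // 100, ("unknown", "Unknown status code", ERROR_INDICATOR))
-- ===== Notes on version B (the rewrite author's own statement) =====
-- stated objective: simpler
-- what changed: Replaced the loop over five ranges with a closed-form dispatch: the hundreds bucket of the status code is looked up once in a constant table with an 'unknown' default.
import Mathlib
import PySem

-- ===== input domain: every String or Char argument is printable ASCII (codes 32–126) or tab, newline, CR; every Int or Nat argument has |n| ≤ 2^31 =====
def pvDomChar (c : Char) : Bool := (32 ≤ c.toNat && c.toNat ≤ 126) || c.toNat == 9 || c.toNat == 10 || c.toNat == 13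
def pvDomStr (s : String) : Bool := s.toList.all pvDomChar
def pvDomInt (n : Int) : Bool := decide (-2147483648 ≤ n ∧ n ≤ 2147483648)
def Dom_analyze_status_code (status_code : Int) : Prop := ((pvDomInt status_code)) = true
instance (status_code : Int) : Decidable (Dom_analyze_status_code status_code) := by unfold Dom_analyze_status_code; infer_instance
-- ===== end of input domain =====

-- B replaces A's scan over five ranges with a closed-form bucket (status_code // 100) table lookup: simpler, same values everywhere.


-- ===== PORT A =====
-- Port of A: scan the five (category, range) entries in dict order; return on first match.
def analyze_status_code (status_code : Int) : String × String × String :=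
  if 100 ≤ status_code ∧ status_code < 200 then ("informational", "Informational response", "⚠")
  else if 200 ≤ status_code ∧ status_code < 300 then ("success", "Request successful", "✓")
  else if 300 ≤ status_code ∧ status_code < 400 then ("redirection", "Redirection required", "⚠")
  else if 400 ≤ status_code ∧ status_code < 500 then ("client_error", "Client error occurred", "✗")
  else if 500 ≤ status_code ∧ status_code < 600 then ("server_error", "Server error occurred", "✗")
  else ("unknown", "Unknown status code", "✗")

-- ===== PORT B =====
-- Port of B: constant bucket table, one floordiv, one dict lookup with default.
def statusBuckets : PySem.Dict Int (String × String × String) :=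
  PySem.Dict.ofList [(1, ("informational", "Informational response", "⚠")),
   (2, ("success", "Request successful", "✓")),
   (3, ("redirection", "Redirection required", "⚠")),
   (4, ("client_error", "Client error occurred", "✗")),
   (5, ("server_error", "Server error occurred", "✗"))]

def analyze_status_code_alt (status_code : Int) : String × String × String :=
  PySem.Dict.getD statusBuckets (PySem.Int.floordiv status_code 100)
    ("unknown", "Unknown status code", "✗")

-- ===== PRECONDITION & SPEC =====
def Spec_analyze_status_code (status_code : Int) (out : String × String × String) : Prop := out = analyze_status_code_alt status_code
instance (status_code : Int) (out : String × String × String) : Decidable (Spec_analyze_status_code status_code out) := by unfold Spec_analyze_status_code; infer_instance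

-- ===== CLAIM (what is proved, stated in full; the proofs are below) =====
def Claim_equal_analyze_status_code : Prop := ∀ (status_code : Int), Dom_analyze_status_code status_code → Spec_analyze_status_code status_code (analyze_status_code status_code)

-- ===== LEMMAS AND PROOFS =====

-- The constant bucket table read with a variable key, as an if-chain.
set_option maxRecDepth 4096 in
theorem statusBuckets_getD (k : Int) (d0 : String × String × String) :
    PySem.Dict.getD statusBuckets k d0 =
      if k = 1 then ("informational", "Informational response", "⚠")
      else if k = 2 then ("success", "Request successful", "✓")
      else if k = 3 then ("redirection", "Redirection required", "⚠")
      else if k = 4 then ("client_error", "Client error occurred", "✗")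
      else if k = 5 then ("server_error", "Server error occurred", "✗")
      else d0 := by
  have h : statusBuckets = PySem.Dict.mk
      [(1, ("informational", "Informational response", "⚠")),
       (2, ("success", "Request successful", "✓")),
       (3, ("redirection", "Redirection required", "⚠")),
       (4, ("client_error", "Client error occurred", "✗")),
       (5, ("server_error", "Server error occurred", "✗"))] := by decide
  rw [h, PySem.Dict.getD_eq_get?_getD]
  simp only [PySem.Dict.get?_mk_cons, beq_iff_eq]
  by_cases h1 : k = 1
  · simp [h1]
  by_cases h2 : k = 2
  · simp [h2]
  by_cases h3 : k = 3
  · simp [h3]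
  by_cases h4 : k = 4
  · simp [h4]
  by_cases h5 : k = 5
  · simp [h5]
  have n1 : (1 : Int) ≠ k := fun e => h1 e.symm
  have n2 : (2 : Int) ≠ k := fun e => h2 e.symm
  have n3 : (3 : Int) ≠ k := fun e => h3 e.symm
  have n4 : (4 : Int) ≠ k := fun e => h4 e.symm
  have n5 : (5 : Int) ≠ k := fun e => h5 e.symm
  simp [h1, h2, h3, h4, h5, n1, n2, n3, n4, n5, PySem.Dict.get?]

-- ===== VERDICT (by name: the statement is the Claim_ definition above) =====
theorem analyze_status_code_spec : Claim_equal_analyze_status_code := by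
  intro s _
  unfold Spec_analyze_status_code analyze_status_code analyze_status_code_alt
  have hb := PySem.Int.floordiv_mul_add_mod s 100
  have h0 := PySem.Int.mod_nonneg s (b := 100) (by omega)
  have h1 := PySem.Int.mod_lt s (b := 100) (by omega)
  set q := PySem.Int.floordiv s 100 with hq
  rw [statusBuckets_getD]
  by_cases c1 : 100 ≤ s ∧ s < 200
  · have h : q = 1 := by omega
    simp [h, c1]
  · by_cases c2 : 200 ≤ s ∧ s < 300
    · have h : q = 2 := by omega
      simp [h, c1, c2]
    · by_cases c3 : 300 ≤ s ∧ s < 400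
      · have h : q = 3 := by omega
        simp [h, c1, c2, c3]
      · by_cases c4 : 400 ≤ s ∧ s < 500
        · have h : q = 4 := by omega
          simp [h, c1, c2, c3, c4]
        · by_cases c5 : 500 ≤ s ∧ s < 600
          · have h : q = 5 := by omega
            simp [h, c1, c2, c3, c4, c5]
          · have n1 : q ≠ 1 := by omega
            have n2 : q ≠ 2 := by omega
            have n3 : q ≠ 3 := by omega
            have n4 : q ≠ 4 := by omega
            have n5 : q ≠ 5 := by omega
            simp [c1, c2, c3, c4, c5, n1, n2, n3, n4, n5]
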